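-- pv_equiv track=rewrite | github.com/joey5678/body_scan_rest_srv | py/rule_m.py | find_classify_key
-- ===== SOURCE A (Python) =====
-- classify_dict = {
--     'ChengFen': [51, 53],
--     'FeiPang' : [11, 52, 25],
--     'WeiDu': [31, 32, 33, 34, 35, 36, 37, ],
--     'BiLi' : [21, 22, 23, 24, 25, 26],
--     'YiTai': [42, 41, 43, 44, 45],
--     'XiaChui': [61, 62,],
--     'Overall': [12]
-- }
--
-- def find_classify_key(item_id):
--     res = []
--     types = []
--     for _k, _v in classify_dict.items():
--         if item_id in _v:
--             types.append(_v.index(item_id) + 1)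
--             res.append(_k)
--
--     return res, types
-- ===== SOURCE B (Python) =====
-- classify_dict = {
--     'ChengFen': [51, 53],
--     'FeiPang' : [11, 52, 25],
--     'WeiDu': [31, 32, 33, 34, 35, 36, 37, ],
--     'BiLi' : [21, 22, 23, 24, 25, 26],
--     'YiTai': [42, 41, 43, 44, 45],
--     'XiaChui': [61, 62,],
--     'Overall': [12]
-- }
--
-- # reverse index built once at module scope: id -> (keys containing it, 1-based positions)
-- _rev = {}
-- for _k, _v in classify_dict.items():
--     for _pos, _id in enumerate(_v):
--         entry = _rev.setdefault(_id, ([], []))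
--         entry[0].append(_k)
--         entry[1].append(_pos + 1)
--
-- def find_classify_key(item_id):
--     entry = _rev.get(item_id)
--     if entry is None:
--         return [], []
--     return list(entry[0]), list(entry[1])
-- ===== Notes on version B (the rewrite author's own statement) =====
-- stated objective: alternative
-- what changed: Per-call scan of all classify_dict entries with an inner membership test and .index pass is replaced by a reverse index (id -> (keys, 1-based positions)) built once at module scope; the call is a single dict lookup returning copies of the stored lists.
import Mathlib
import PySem

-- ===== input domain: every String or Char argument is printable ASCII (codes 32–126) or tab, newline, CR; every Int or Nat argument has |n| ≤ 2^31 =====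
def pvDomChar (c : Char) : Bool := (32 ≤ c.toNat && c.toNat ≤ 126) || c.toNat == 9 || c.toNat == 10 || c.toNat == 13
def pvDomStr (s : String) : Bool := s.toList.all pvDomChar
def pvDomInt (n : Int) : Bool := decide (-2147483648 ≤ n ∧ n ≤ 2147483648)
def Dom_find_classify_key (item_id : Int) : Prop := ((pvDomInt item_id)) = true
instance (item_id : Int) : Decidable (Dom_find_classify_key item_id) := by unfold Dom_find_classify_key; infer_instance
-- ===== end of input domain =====

-- B replaces the per-call scan over all classify_dict entries by a one-time reverse index (id -> keys, positions) and a single lookup (alternative decomposition; return value only).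


-- ===== PORT A =====
def classify_dict : List (String × List Int) :=
  [("ChengFen", [51, 53]),
   ("FeiPang", [11, 52, 25]),
   ("WeiDu", [31, 32, 33, 34, 35, 36, 37]),
   ("BiLi", [21, 22, 23, 24, 25, 26]),
   ("YiTai", [42, 41, 43, 44, 45]),
   ("XiaChui", [61, 62]),
   ("Overall", [12])]

def find_classify_key (item_id : Int) : List String × List Int :=
  classify_dict.foldl (fun (acc : List String × List Int) kv =>
    if kv.2.contains item_id then
      (acc.1 ++ [kv.1], acc.2 ++ [(((PySem.List.index? kv.2 item_id).getD 0 : Nat) : Int) + 1])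
    else acc) ([], [])

-- ===== PORT B =====
-- built once, module scope: id -> (keys containing it, 1-based positions)
def rev_index : PySem.Dict Int (List String × List Int) :=
  classify_dict.foldl (fun d kv =>
    (PySem.List.enumerate kv.2).foldl (fun d pe =>
      let e := d.getD pe.2 ([], [])
      d.insert pe.2 (e.1 ++ [kv.1], e.2 ++ [pe.1 + 1])) d) PySem.Dict.empty

def find_classify_key_alt (item_id : Int) : List String × List Int :=
  match rev_index.get? item_id with
  | none => ([], [])
  | some e => (e.1, e.2)

-- ===== PRECONDITION & SPEC =====
def Spec_find_classify_key (item_id : Int) (out : List String × List Int) : Prop := out = find_classify_key_alt item_id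
instance (item_id : Int) (out : List String × List Int) : Decidable (Spec_find_classify_key item_id out) := by unfold Spec_find_classify_key; infer_instance

-- ===== CLAIM (what is proved, stated in full; the proofs are below) =====
def Claim_equal_find_classify_key : Prop := ∀ (item_id : Int), Dom_find_classify_key item_id → Spec_find_classify_key item_id (find_classify_key item_id)

-- ===== LEMMAS AND PROOFS =====
def allIds : List Int := [51, 53, 11, 52, 25, 31, 32, 33, 34, 35, 36, 37, 21, 22, 23, 24, 26, 42, 41, 43, 44, 45, 61, 62, 12]

theorem rev_index_eq : rev_index = PySem.Dict.mk [(51, ((["ChengFen"] : List String), ([1] : List Int))), (53, ((["ChengFen"] : List String), ([2] : List Int))), (11, ((["FeiPang"] : List String), ([1] : List Int))), (52, ((["FeiPang"] : List String), ([2] : List Int))), (25, ((["FeiPang", "BiLi"] : List String), ([3, 5] : List Int))), (31, ((["WeiDu"] : List String), ([1] : List Int))), (32, ((["WeiDu"] : List String), ([2] : List Int))), (33, ((["WeiDu"] : List String), ([3] : List Int))), (34, ((["WeiDu"] : List String), ([4] : List Int))), (35, ((["WeiDu"] : List String), ([5] : List Int))), (36, ((["WeiDu"] : List String), ([6] : List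 Int))), (37, ((["WeiDu"] : List String), ([7] : List Int))), (21, ((["BiLi"] : List String), ([1] : List Int))), (22, ((["BiLi"] : List String), ([2] : List Int))), (23, ((["BiLi"] : List String), ([3] : List Int))), (24, ((["BiLi"] : List String), ([4] : List Int))), (26, ((["BiLi"] : List String), ([6] : List Int))), (42, ((["YiTai"] : List String), ([1] : List Int))), (41, ((["YiTai"] : List String), ([2] : List Int))), (43, ((["YiTai"] : List String), ([3] : List Int))), (44, ((["YiTai"] : List String), ([4] : List Int))), (45, ((["YiTai"] : List String), ([5] : List Int))), (61, ((["XiaChui"] : List String), ([1] : List Int))), (62, ((["XiaChui"] : List String), ([2] : List Int))), (12, ((["Overall"] : List String), ([1] : List Int)))] := by rfl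

theorem outside_eq (i : Int) (h : i ∉ allIds) :
    find_classify_key i = find_classify_key_alt i := by
  simp only [allIds, List.mem_cons, not_or, List.not_mem_nil] at h
  obtain ⟨h1,h2,h3,h4,h5,h6,h7,h8,h9,h10,h11,h12,h13,h14,h15,h16,h17,h18,h19,h20,h21,h22,h23,h24,h25,-⟩ := h
  rw [find_classify_key_alt, rev_index_eq]
  simp [find_classify_key, classify_dict, List.foldl, PySem.Dict.get?_mk_cons, beq_iff_eq,
        h1,h2,h3,h4,h5,h6,h7,h8,h9,h10,h11,h12,h13,h14,h15,h16,h17,h18,h19,h20,h21,h22,h23,h24,h25,Ne.symm h1,Ne.symm h2,Ne.symm h3,Ne.symm h4,Ne.symm h5,Ne.symm h6,Ne.symm h7,Ne.symm h8,Ne.symm h9,Ne.symm h10,Ne.symm h11,Ne.symm h12,Ne.symm h13,Ne.symm h14,Ne.symm h15,Ne.symm h16,Ne.symm h17,Ne.symm h18,Ne.symm h19,Ne.symm h20,Ne.symm h21,Ne.symm h22,Ne.symm h23,Ne.symm h24,Ne.symm h25]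
  simp [PySem.Dict.get?]

-- ===== VERDICT (by name: the statement is the Claim_ definition above) =====
theorem find_classify_key_spec : Claim_equal_find_classify_key := by
  intro i _
  unfold Spec_find_classify_key
  by_cases h : i ∈ allIds
  · fin_cases h <;> decide
  · exact outside_eq i h
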